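-- pv_equiv track=rewrite | github.com/ComfyAssets/kiko-trainer | backend/server.py | _convert_simple_prompt_toml
-- ===== SOURCE A (Python) =====
-- def _convert_simple_prompt_toml(src: str) -> str:
--     lines = src.replace('\r\n', '\n').replace('\r', '\n').split('\n')
--     blocks: list[list[str]] = []
--     current: list[str] | None = None
--     for ln in lines:
--         s = ln.strip()
--         if not s:
--             continue
--         if s.startswith('[[prompt]]'):
--             if current:
--                 blocks.append(current)
--             current = []
--             continue
--         # collect k = v lines only
--         if '=' in s and not s.startswith('#'):
--             if current is None:
--                 current = []
--             # normalize 'text' -> 'prompt'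
--             if s.startswith('text'):
--                 key, val = s.split('=', 1)
--                 s = f"prompt ={val}"
--             current.append(s)
--     if current:
--         blocks.append(current)
--     # Build target TOML
--     out: list[str] = []
--     out.append('[prompt]')
--     for blk in blocks:
--         out.append('')
--         out.append('[[prompt.subset]]')
--         out.extend(blk)
--     out.append('')
--     return '\n'.join(out)
-- ===== SOURCE B (Python) =====
-- def _norm(s: str) -> str:
--     return 'prompt =' + s.split('=', 1)[1] if s.startswith('text') else s
--
--
-- def _keep(seg: list) -> list:
--     return [_norm(s) for s in seg if '=' in s and not s.startswith('#')]
--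
--
-- def _convert_simple_prompt_toml(src: str) -> str:
--     text = src.replace('\r\n', '\n').replace('\r', '\n')
--     nonempty = [s for s in (ln.strip() for ln in text.split('\n')) if s]
--     # pass 1: partition into segments at '[[prompt]]' marker lines (markers removed)
--     segments = [[]]
--     for s in nonempty:
--         if s.startswith('[[prompt]]'):
--             segments.append([])
--         else:
--             segments[-1].append(s)
--     # pass 2: keep/normalize the k = v lines of each segment; drop empty segments
--     blocks = []
--     for seg in segments:
--         kept = _keep(seg)
--         if kept:
--             blocks.append(kept)
--     parts = ['[prompt]']
--     for blk in blocks: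
--         parts.extend(['', '[[prompt.subset]]'])
--         parts.extend(blk)
--     parts.append('')
--     return '\n'.join(parts)
-- ===== Notes on version B (the rewrite author's own statement) =====
-- stated objective: alternative
-- what changed: Replaced A's single-pass state machine (blocks/current Option state with inline strip, skip, flush and rewrite) by a two-pass pipeline: strip and drop empty lines, partition into segments at '[[prompt]]' markers, then per segment filter/normalize the k=v lines and drop empty segments before assembling.
import Mathlib
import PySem

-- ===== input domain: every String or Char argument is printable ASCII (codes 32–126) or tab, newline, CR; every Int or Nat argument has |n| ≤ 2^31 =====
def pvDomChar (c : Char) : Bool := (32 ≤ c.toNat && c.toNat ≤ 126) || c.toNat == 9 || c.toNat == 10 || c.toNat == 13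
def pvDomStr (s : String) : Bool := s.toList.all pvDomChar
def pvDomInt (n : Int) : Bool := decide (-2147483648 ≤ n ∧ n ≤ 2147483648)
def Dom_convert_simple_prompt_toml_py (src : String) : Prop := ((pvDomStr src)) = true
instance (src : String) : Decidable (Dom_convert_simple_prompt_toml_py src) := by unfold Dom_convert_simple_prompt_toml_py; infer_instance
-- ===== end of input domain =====

-- B is a two-pass pipeline (segment at markers, then filter/normalize per segment) instead of
-- A's one-pass state machine; objective: alternative decomposition, same asymptotic cost.

-- ===== PORT A =====
-- 'if current: blocks.append(current)' (Python truthiness: non-None and non-empty)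
def pvA_flush (blocks : List (List String)) (cur : Option (List String)) : List (List String) :=
  match cur with
  | some (c :: cs) => blocks ++ [c :: cs]
  | _ => blocks

-- "normalize 'text' -> 'prompt'": key, val = s.split('=', 1); s = f"prompt ={val}"
def pvA_rewrite (s : String) : String :=
  if PySem.Str.startswith s "text" then
    match PySem.Str.splitMax? s "=" 1 with
    | some (_key :: val :: _) => "prompt =" ++ val
    | _ => ""  -- unreachable: guarded by '=' in s, so the split has two parts
  else s

-- the body of A's single for-loop, carried state (blocks, current)
def pvA_loop : List String → List (List String) → Option (List String) → List (List String)
  | [], blocks, cur => pvA_flush blocks cur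
  | ln :: rest, blocks, cur =>
      let s := PySem.Str.strip ln
      if s = "" then pvA_loop rest blocks cur
      else if PySem.Str.startswith s "[[prompt]]" then
        pvA_loop rest (pvA_flush blocks cur) (some [])
      else if PySem.Str.isIn "=" s && !PySem.Str.startswith s "#" then
        pvA_loop rest blocks (some (cur.getD [] ++ [pvA_rewrite s]))
      else pvA_loop rest blocks cur

def convert_simple_prompt_toml_py (src : String) : String :=
  -- split? with sep "\n" ≠ "" is never none; .getD [] is the unreachable default
  let lines := (PySem.Str.split? (PySem.Str.replace (PySem.Str.replace src "\r\n" "\n") "\r" "\n") "\n").getD []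
  let blocks := pvA_loop lines [] none
  let out := blocks.foldl (fun o blk => o ++ ["", "[[prompt.subset]]"] ++ blk) ["[prompt]"]
  PySem.Str.join "\n" (out ++ [""])

-- ===== PORT B =====
def pvB_marker (s : String) : Bool := PySem.Str.startswith s "[[prompt]]"

def pvB_kv (s : String) : Bool := PySem.Str.isIn "=" s && !PySem.Str.startswith s "#"

def pvB_norm (s : String) : String :=
  if PySem.Str.startswith s "text" then
    match PySem.Str.splitMax? s "=" 1 with
    | some (_ :: val :: _) => "prompt =" ++ val
    | _ => ""  -- unreachable: _norm is only applied to lines containing '='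
  else s

-- '_keep(seg)': kv lines of a segment, normalized
def pvB_keep (seg : List String) : List String := (seg.filter pvB_kv).map pvB_norm

-- 'segments[-1].append(s)' (segments is never empty)
def pvB_appendLast (segs : List (List String)) (s : String) : List (List String) :=
  segs.dropLast ++ [segs.getLastD [] ++ [s]]

def convert_simple_prompt_toml_py_alt (src : String) : String :=
  let text := PySem.Str.replace (PySem.Str.replace src "\r\n" "\n") "\r" "\n"
  -- split? with sep "\n" ≠ "" is never none; .getD [] is the unreachable default
  let nonempty := (((PySem.Str.split? text "\n").getD []).map PySem.Str.strip).filter (· ≠ "")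
  let segments := nonempty.foldl
    (fun segs s => if pvB_marker s then segs ++ [[]] else pvB_appendLast segs s) [[]]
  let blocks := (segments.map pvB_keep).filter (fun k => !k.isEmpty)
  PySem.Str.join "\n"
    (["[prompt]"] ++ blocks.flatMap (fun blk => ["", "[[prompt.subset]]"] ++ blk) ++ [""])

-- ===== PRECONDITION & SPEC =====
def Spec_convert_simple_prompt_toml_py (src : String) (out : String) : Prop := out = convert_simple_prompt_toml_py_alt src
instance (src : String) (out : String) : Decidable (Spec_convert_simple_prompt_toml_py src out) := by unfold Spec_convert_simple_prompt_toml_py; infer_instance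

-- ===== CLAIM (what is proved, stated in full; the proofs are below) =====
def Claim_equal_convert_simple_prompt_toml_py : Prop := ∀ (src : String), Dom_convert_simple_prompt_toml_py src → Spec_convert_simple_prompt_toml_py src (convert_simple_prompt_toml_py src)

-- ===== LEMMAS AND PROOFS =====

-- head segment / tail segments of a clean (stripped, non-empty) line list
def pvSeg : List String → List String × List (List String)
  | [] => ([], [])
  | s :: rest =>
      let ht := pvSeg rest
      if pvB_marker s then ([], ht.1 :: ht.2) else (s :: ht.1, ht.2)

theorem pvSeg_cons_marker (s : String) (ne : List String) (h : pvB_marker s = true) :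
    pvSeg (s :: ne) = ([], (pvSeg ne).1 :: (pvSeg ne).2) := by
  simp [pvSeg, h]

theorem pvSeg_cons_other (s : String) (ne : List String) (h : pvB_marker s = false) :
    pvSeg (s :: ne) = (s :: (pvSeg ne).1, (pvSeg ne).2) := by
  simp [pvSeg, h]

theorem pvB_keep_nil : pvB_keep [] = [] := rfl

theorem pvB_keep_cons_kv (s : String) (seg : List String) (h : pvB_kv s = true) :
    pvB_keep (s :: seg) = pvB_norm s :: pvB_keep seg := by
  simp [pvB_keep, h]

theorem pvB_keep_cons_skip (s : String) (seg : List String) (h : pvB_kv s = false) :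
    pvB_keep (s :: seg) = pvB_keep seg := by
  simp [pvB_keep, h]

theorem pvNE_cons_empty (ln : String) (rest : List String) (h : PySem.Str.strip ln = "") :
    ((ln :: rest).map PySem.Str.strip).filter (· ≠ "") =
      (rest.map PySem.Str.strip).filter (· ≠ "") := by
  simp [h]

theorem pvNE_cons (ln : String) (rest : List String) (h : ¬ PySem.Str.strip ln = "") :
    ((ln :: rest).map PySem.Str.strip).filter (· ≠ "") =
      PySem.Str.strip ln :: (rest.map PySem.Str.strip).filter (· ≠ "") := by
  simp [h]

theorem pvB_appendLast_concat (done : List (List String)) (cur : List String) (s : String) :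
    pvB_appendLast (done ++ [cur]) s = done ++ [cur ++ [s]] := by
  simp [pvB_appendLast]

-- B's foldl over segments, characterized by pvSeg
theorem pvB_fold_eq (ne : List String) :
    ∀ (done : List (List String)) (cur : List String),
    ne.foldl (fun segs s => if pvB_marker s then segs ++ [[]] else pvB_appendLast segs s)
      (done ++ [cur]) = done ++ (cur ++ (pvSeg ne).1) :: (pvSeg ne).2 := by
  induction ne with
  | nil => intro done cur; simp [pvSeg]
  | cons s rest ih =>
      intro done cur
      by_cases hm : pvB_marker s = true
      · have h1 : (done ++ [cur]) ++ [[]] = (done ++ [cur]) ++ [([] : List String)] := rfl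
        simp only [List.foldl_cons, hm, if_true]
        rw [h1, ih (done ++ [cur]) []]
        simp [pvSeg, hm]
      · simp only [List.foldl_cons, hm, if_false, Bool.false_eq_true,
          pvB_appendLast_concat, ih done (cur ++ [s])]
        simp [pvSeg, hm]

theorem pvB_fold_eq' (ne : List String) :
    ne.foldl (fun segs s => if pvB_marker s then segs ++ [[]] else pvB_appendLast segs s) [[]] =
      (pvSeg ne).1 :: (pvSeg ne).2 := by
  have h := pvB_fold_eq ne [] []
  simpa using h

-- A's loop, characterized by pvSeg of the stripped, non-empty lines
theorem pvA_loop_eq (lines : List String) :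
    ∀ (blocks : List (List String)) (cur : Option (List String)),
    pvA_loop lines blocks cur =
      blocks ++ ((cur.getD [] ++ pvB_keep (pvSeg ((lines.map PySem.Str.strip).filter (· ≠ ""))).1) ::
        (pvSeg ((lines.map PySem.Str.strip).filter (· ≠ ""))).2.map pvB_keep).filter
          (fun k => !k.isEmpty) := by
  induction lines with
  | nil =>
      intro blocks cur
      cases cur with
      | none => simp [pvA_loop, pvA_flush, pvSeg, pvB_keep]
      | some c => cases c <;> simp [pvA_loop, pvA_flush, pvSeg, pvB_keep]
  | cons ln rest ih =>
      intro blocks cur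
      show (if PySem.Str.strip ln = "" then pvA_loop rest blocks cur else _) = _
      by_cases he : PySem.Str.strip ln = ""
      · rw [if_pos he, ih, pvNE_cons_empty ln rest he]
      · rw [if_neg he, pvNE_cons ln rest he]
        rcases hm : pvB_marker (PySem.Str.strip ln) with _ | _
        · -- not a '[[prompt]]' marker line
          rw [show PySem.Str.startswith (PySem.Str.strip ln) "[[prompt]]" =
                pvB_marker (PySem.Str.strip ln) from rfl, hm, if_neg Bool.false_ne_true,
              pvSeg_cons_other _ _ hm]
          rcases hk : pvB_kv (PySem.Str.strip ln) with _ | _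
          · -- not a kept k = v line
            rw [show (PySem.Str.isIn "=" (PySem.Str.strip ln) &&
                  !PySem.Str.startswith (PySem.Str.strip ln) "#") =
                  pvB_kv (PySem.Str.strip ln) from rfl, hk, if_neg Bool.false_ne_true, ih]
            rw [pvB_keep_cons_skip _ _ hk]
          · -- a kept k = v line
            rw [show (PySem.Str.isIn "=" (PySem.Str.strip ln) &&
                  !PySem.Str.startswith (PySem.Str.strip ln) "#") =
                  pvB_kv (PySem.Str.strip ln) from rfl, hk, if_pos rfl, ih]
            rw [show pvA_rewrite (PySem.Str.strip ln) = pvB_norm (PySem.Str.strip ln) from rfl,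
                pvB_keep_cons_kv _ _ hk]
            simp [List.append_assoc]
        · -- a '[[prompt]]' marker line
          rw [show PySem.Str.startswith (PySem.Str.strip ln) "[[prompt]]" =
                pvB_marker (PySem.Str.strip ln) from rfl, hm, if_pos rfl, ih,
              pvSeg_cons_marker _ _ hm]
          cases cur with
          | none => simp [pvA_flush, pvB_keep_nil, List.filter_cons]
          | some c =>
              cases c <;> simp [pvA_flush, pvB_keep_nil, List.filter_cons, List.append_assoc]

theorem pv_out_fold (blocks : List (List String)) :
    blocks.foldl (fun o blk => o ++ ["", "[[prompt.subset]]"] ++ blk) ["[prompt]"] =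
      ["[prompt]"] ++ blocks.flatMap (fun blk => ["", "[[prompt.subset]]"] ++ blk) := by
  induction blocks using List.reverseRecOn with
  | nil => simp
  | append_singleton bs b ih =>
      rw [List.foldl_append, ih]
      simp [List.flatMap_append, List.append_assoc]

-- ===== VERDICT (by name: the statement is the Claim_ definition above) =====
theorem convert_simple_prompt_toml_py_spec : Claim_equal_convert_simple_prompt_toml_py := by
  intro src _
  show convert_simple_prompt_toml_py src = convert_simple_prompt_toml_py_alt src
  simp only [convert_simple_prompt_toml_py, convert_simple_prompt_toml_py_alt]
  rw [pvA_loop_eq, pv_out_fold, pvB_fold_eq', List.map_cons]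
  simp
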